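-- pv_equiv track=rewrite | github.com/JulianSampels/ISWC-2026-SJP | code/iswc/dataset_stats.py | _bfs_directed_hops
-- ===== SOURCE A (Python) =====
-- from typing import Dict, Iterator, List, NamedTuple, Optional, Set, Tuple
--
-- def _bfs_directed_hops(
--     start: str,
--     target: str,
--     out_adj: Dict[str, List[Tuple[str, str]]],
--     max_hops: int,
-- ) -> Optional[int]:
--     """Return the shortest directed-path hop count from start to target, or None."""
--     if start == target:
--         return 0
--     visited = {start}
--     frontier = {start}
--     for hop in range(1, max_hops + 1):
--         nxt: Set[str] = set()
--         for node in frontier: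
--             for _, nbr in out_adj.get(node, []):
--                 if nbr == target:
--                     return hop
--                 if nbr not in visited:
--                     visited.add(nbr)
--                     nxt.add(nbr)
--         frontier = nxt
--         if not frontier:
--             break
--     return None
-- ===== SOURCE B (Python) =====
-- from typing import Dict, List, Optional, Tuple
--
-- def _bfs_directed_hops(
--     start: str,
--     target: str,
--     out_adj: Dict[str, List[Tuple[str, str]]],
--     max_hops: int,
-- ) -> Optional[int]:
--     """Return the shortest directed-path hop count from start to target, or None."""
--     if start == target:
--         return 0
--     reached = {start}
--     for hop in range(1, max_hops + 1):
--         new = {nbr for node in reached for _, nbr in out_adj.get(node, [])}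
--         if target in new:
--             return hop
--         if new <= reached:
--             return None
--         reached |= new
--     return None
-- ===== Notes on version B (the rewrite author's own statement) =====
-- stated objective: simpler
-- what changed: Replaces the incremental visited/frontier-with-dedup bookkeeping by a plain round-based closure: each round recomputes the whole neighbour set of everything reached so far with one set comprehension, checks the target, and stops when the reached set no longer grows.
import Mathlib
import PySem

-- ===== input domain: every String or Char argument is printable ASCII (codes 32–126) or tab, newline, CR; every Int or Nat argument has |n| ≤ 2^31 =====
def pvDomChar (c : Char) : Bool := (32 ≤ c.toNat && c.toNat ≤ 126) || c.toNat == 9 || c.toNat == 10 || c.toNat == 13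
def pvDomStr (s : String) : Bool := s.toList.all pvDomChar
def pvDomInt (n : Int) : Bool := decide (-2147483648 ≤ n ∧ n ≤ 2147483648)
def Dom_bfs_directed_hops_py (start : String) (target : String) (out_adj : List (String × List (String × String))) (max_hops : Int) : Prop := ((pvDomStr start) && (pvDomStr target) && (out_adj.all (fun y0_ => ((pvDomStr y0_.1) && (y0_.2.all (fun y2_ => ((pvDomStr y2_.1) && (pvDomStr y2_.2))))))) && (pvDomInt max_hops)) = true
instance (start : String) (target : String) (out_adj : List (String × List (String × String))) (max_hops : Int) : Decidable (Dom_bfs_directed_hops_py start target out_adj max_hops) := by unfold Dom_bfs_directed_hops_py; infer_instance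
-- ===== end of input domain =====

-- B replaces A's visited/frontier level bookkeeping by a plain round-based closure over a single
-- reached set (one comprehension per round, stop when it no longer grows): simpler, not faster.

-- ===== PORT A =====
-- inner 'for _, nbr in out_adj.get(node, [])' loop; none = the 'return hop' early exit
def pvA_edges (target : String) (edges : List (String × String))
    (visited nxt : PySem.Set String) : Option (PySem.Set String × PySem.Set String) :=
  match edges with
  | [] => some (visited, nxt)
  | (_, nbr) :: rest =>
      if nbr = target then none
      else if nbr ∈ visited then pvA_edges target rest visited nxt
      else pvA_edges target rest (PySem.Set.add visited nbr) (PySem.Set.add nxt nbr)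

-- 'for node in frontier' loop (result is order-independent, so iterating the Set's list is exact)
def pvA_nodes (target : String) (out_adj : List (String × List (String × String)))
    (nodes : List String) (visited nxt : PySem.Set String) :
    Option (PySem.Set String × PySem.Set String) :=
  match nodes with
  | [] => some (visited, nxt)
  | node :: rest =>
      match pvA_edges target (PySem.Dict.getD ⟨out_adj⟩ node []) visited nxt with
      | none => none
      | some (v, nx) => pvA_nodes target out_adj rest v nx

-- 'for hop in range(1, max_hops + 1)' as a counter loop (range is consumed lazily in Python)
def pvA_loop (target : String) (out_adj : List (String × List (String × String)))
    (max_hops hop : Int) (visited frontier : PySem.Set String) : Option Int :=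
  if _h : hop < max_hops + 1 then
    match pvA_nodes target out_adj frontier visited PySem.Set.empty with
    | none => some hop
    | some (v, nxt) =>
        if nxt.isEmpty then none
        else pvA_loop target out_adj max_hops (hop + 1) v nxt
  else none
termination_by (max_hops + 1 - hop).toNat
decreasing_by omega

def bfs_directed_hops_py (start : String) (target : String) (out_adj : List (String × List (String × String))) (max_hops : Int) : Option Int :=
  if start = target then some 0
  else pvA_loop target out_adj max_hops 1 (PySem.Set.ofList [start]) (PySem.Set.ofList [start])

-- ===== PORT B =====
-- '{nbr for node in reached for _, nbr in out_adj.get(node, [])}'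
def pvB_new (out_adj : List (String × List (String × String)))
    (reached : PySem.Set String) : PySem.Set String :=
  PySem.Set.ofList (reached.flatMap (fun node => (PySem.Dict.getD ⟨out_adj⟩ node []).map Prod.snd))

def pvB_loop (target : String) (out_adj : List (String × List (String × String)))
    (max_hops hop : Int) (reached : PySem.Set String) : Option Int :=
  if _h : hop < max_hops + 1 then
    let new := pvB_new out_adj reached
    if target ∈ new then some hop
    else if PySem.Set.issubset new reached then none
    else pvB_loop target out_adj max_hops (hop + 1) (PySem.Set.union reached new)
  else none
termination_by (max_hops + 1 - hop).toNat
decreasing_by omega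

def bfs_directed_hops_py_alt (start : String) (target : String) (out_adj : List (String × List (String × String))) (max_hops : Int) : Option Int :=
  if start = target then some 0
  else pvB_loop target out_adj max_hops 1 (PySem.Set.ofList [start])

-- ===== PRECONDITION & SPEC =====
def Spec_bfs_directed_hops_py (start : String) (target : String) (out_adj : List (String × List (String × String))) (max_hops : Int) (out : Option Int) : Prop := out = bfs_directed_hops_py_alt start target out_adj max_hops
instance (start : String) (target : String) (out_adj : List (String × List (String × String))) (max_hops : Int) (out : Option Int) : Decidable (Spec_bfs_directed_hops_py start target out_adj max_hops out) := by unfold Spec_bfs_directed_hops_py; infer_instance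

-- ===== CLAIM (what is proved, stated in full; the proofs are below) =====
def Claim_equal_bfs_directed_hops_py : Prop := ∀ (start : String) (target : String) (out_adj : List (String × List (String × String))) (max_hops : Int), Dom_bfs_directed_hops_py start target out_adj max_hops → Spec_bfs_directed_hops_py start target out_adj max_hops (bfs_directed_hops_py start target out_adj max_hops)

-- ===== LEMMAS AND PROOFS =====

-- x is a direct successor of some node in l
def pvNB (out_adj : List (String × List (String × String))) (l : List String) (x : String) : Prop :=
  ∃ n ∈ l, x ∈ (PySem.Dict.getD ⟨out_adj⟩ n []).map Prod.snd

lemma pvNB_mono {out_adj : List (String × List (String × String))} {l l' : List String} {x : String}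
    (hsub : ∀ y ∈ l, y ∈ l') (h : pvNB out_adj l x) : pvNB out_adj l' x := by
  obtain ⟨n, hn, hx⟩ := h
  exact ⟨n, hsub n hn, hx⟩

lemma pvNB_congr {out_adj : List (String × List (String × String))} {l l' : List String}
    (h : ∀ y, y ∈ l ↔ y ∈ l') (x : String) : pvNB out_adj l x ↔ pvNB out_adj l' x :=
  ⟨pvNB_mono (fun y hy => (h y).1 hy), pvNB_mono (fun y hy => (h y).2 hy)⟩

lemma pvNB_cons {out_adj : List (String × List (String × String))} {n : String} {l : List String}
    {x : String} : pvNB out_adj (n :: l) x ↔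
      x ∈ (PySem.Dict.getD ⟨out_adj⟩ n []).map Prod.snd ∨ pvNB out_adj l x := by
  constructor
  · rintro ⟨m, hm, hx⟩
    rcases List.mem_cons.1 hm with rfl | hm
    · exact Or.inl hx
    · exact Or.inr ⟨m, hm, hx⟩
  · rintro (hx | ⟨m, hm, hx⟩)
    · exact ⟨n, List.mem_cons_self, hx⟩
    · exact ⟨m, List.mem_cons_of_mem _ hm, hx⟩

lemma pvB_new_mem (out_adj : List (String × List (String × String)))
    (reached : PySem.Set String) (x : String) :
    x ∈ pvB_new out_adj reached ↔ pvNB out_adj reached x := by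
  unfold pvB_new pvNB
  simp [PySem.Set.mem_ofList, List.mem_flatMap]

-- characterisation of the inner edge loop of A
lemma pvA_edges_spec (target : String) :
    ∀ (edges : List (String × String)) (v nx : PySem.Set String),
    (pvA_edges target edges v nx = none ↔ target ∈ edges.map Prod.snd) ∧
    (∀ v' nx', pvA_edges target edges v nx = some (v', nx') →
       (∀ x, x ∈ v' ↔ x ∈ v ∨ x ∈ edges.map Prod.snd) ∧
       (∀ x, x ∈ nx' ↔ x ∈ nx ∨ (x ∈ edges.map Prod.snd ∧ x ∉ v))) := by
  intro edges
  induction edges with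
  | nil =>
      intro v nx
      constructor
      · simp [pvA_edges]
      · intro v' nx' h
        simp only [pvA_edges, Option.some.injEq, Prod.mk.injEq] at h
        obtain ⟨h1, h2⟩ := h
        subst h1; subst h2
        simp
  | cons e rest ih =>
      intro v nx
      obtain ⟨a, nbr⟩ := e
      by_cases htg : nbr = target
      · subst htg
        constructor
        · simp [pvA_edges]
        · intro v' nx' h; simp [pvA_edges] at h
      · by_cases hv : nbr ∈ v
        · have h1 : pvA_edges target ((a, nbr) :: rest) v nx = pvA_edges target rest v nx := by
            simp [pvA_edges, htg, hv]
          constructor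
          · rw [h1, (ih v nx).1]
            simp [Ne.symm htg]
          · intro v' nx' h
            rw [h1] at h
            obtain ⟨hv', hnx'⟩ := (ih v nx).2 v' nx' h
            constructor
            · intro x
              simp only [hv' x, List.map_cons, List.mem_cons]
              constructor
              · tauto
              · rintro (hx | rfl | hx) <;> tauto
            · intro x
              simp only [hnx' x, List.map_cons, List.mem_cons]
              constructor
              · tauto
              · rintro (hx | ⟨(rfl | hx), hxv⟩) <;> tauto
        · have h1 : pvA_edges target ((a, nbr) :: rest) v nx
              = pvA_edges target rest (PySem.Set.add v nbr) (PySem.Set.add nx nbr) := by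
            simp [pvA_edges, htg, hv]
          constructor
          · rw [h1, (ih _ _).1]
            simp [Ne.symm htg]
          · intro v' nx' h
            rw [h1] at h
            obtain ⟨hv', hnx'⟩ := (ih _ _).2 v' nx' h
            constructor
            · intro x
              simp only [hv' x, PySem.Set.mem_add, List.map_cons, List.mem_cons]
              tauto
            · intro x
              simp only [hnx' x, PySem.Set.mem_add, List.map_cons, List.mem_cons]
              constructor
              · rintro ((hx | rfl) | ⟨hx, hxv⟩)
                · exact Or.inl hx
                · exact Or.inr ⟨Or.inl rfl, hv⟩
                · exact Or.inr ⟨Or.inr hx, fun hc => hxv (Or.inl hc)⟩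
              · rintro (hx | ⟨(rfl | hx), hxv⟩)
                · exact Or.inl (Or.inl hx)
                · exact Or.inl (Or.inr rfl)
                · by_cases hxb : x = nbr
                  · exact Or.inl (Or.inr hxb)
                  · exact Or.inr ⟨hx, fun hc => hc.elim hxv hxb⟩

-- characterisation of the frontier loop of A
lemma pvA_nodes_spec (target : String) (out_adj : List (String × List (String × String))) :
    ∀ (nodes : List String) (v nx : PySem.Set String),
    (pvA_nodes target out_adj nodes v nx = none ↔ pvNB out_adj nodes target) ∧
    (∀ v' nx', pvA_nodes target out_adj nodes v nx = some (v', nx') →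
       (∀ x, x ∈ v' ↔ x ∈ v ∨ pvNB out_adj nodes x) ∧
       (∀ x, x ∈ nx' ↔ x ∈ nx ∨ (pvNB out_adj nodes x ∧ x ∉ v))) := by
  intro nodes
  induction nodes with
  | nil =>
      intro v nx
      constructor
      · simp [pvA_nodes, pvNB]
      · intro v' nx' h
        simp only [pvA_nodes, Option.some.injEq, Prod.mk.injEq] at h
        obtain ⟨h1, h2⟩ := h
        subst h1; subst h2
        simp [pvNB]
  | cons node rest ih =>
      intro v nx
      rcases hE : pvA_edges target (PySem.Dict.getD ⟨out_adj⟩ node []) v nx with _ | ⟨v1, nx1⟩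
      · have hT : target ∈ (PySem.Dict.getD ⟨out_adj⟩ node []).map Prod.snd :=
          ((pvA_edges_spec target _ v nx).1).1 hE
        constructor
        · simp only [pvA_nodes, hE]
          simp [pvNB_cons, hT]
        · intro v' nx' h
          simp [pvA_nodes, hE] at h
      · have hEs := (pvA_edges_spec target _ v nx).2 v1 nx1 hE
        have hnT : target ∉ (PySem.Dict.getD ⟨out_adj⟩ node []).map Prod.snd := by
          intro hT
          have := ((pvA_edges_spec target _ v nx).1).2 hT
          simp [hE] at this
        have hstep : pvA_nodes target out_adj (node :: rest) v nx
            = pvA_nodes target out_adj rest v1 nx1 := by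
          simp [pvA_nodes, hE]
        constructor
        · rw [hstep, (ih v1 nx1).1, pvNB_cons]
          tauto
        · intro v' nx' h
          rw [hstep] at h
          obtain ⟨hv', hnx'⟩ := (ih v1 nx1).2 v' nx' h
          obtain ⟨hv1, hnx1⟩ := hEs
          constructor
          · intro x
            rw [hv' x, hv1 x, pvNB_cons]
            tauto
          · intro x
            rw [hnx' x, hnx1 x, pvNB_cons]
            constructor
            · rintro ((hx | ⟨hx, hxv⟩) | ⟨hx, hxv1⟩)
              · tauto
              · tauto
              · rw [hv1 x] at hxv1
                tauto
            · rintro (hx | ⟨(hx | hx), hxv⟩)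
              · tauto
              · tauto
              · by_cases hxe : x ∈ (PySem.Dict.getD ⟨out_adj⟩ node []).map Prod.snd
                · tauto
                · right
                  refine ⟨hx, ?_⟩
                  rw [hv1 x]
                  tauto

-- the two round loops agree under the simulation invariant
lemma pvLoop_eq (target : String) (out_adj : List (String × List (String × String)))
    (max_hops : Int) :
    ∀ (n : Nat) (hop : Int) (visited frontier reached : PySem.Set String),
    (max_hops + 1 - hop).toNat = n →
    (∀ x, x ∈ visited ↔ x ∈ reached) →
    (∀ x ∈ frontier, x ∈ visited) →
    (∀ x, pvNB out_adj visited x → x ∈ visited ∨ pvNB out_adj frontier x) →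
    target ∉ visited →
    pvA_loop target out_adj max_hops hop visited frontier
      = pvB_loop target out_adj max_hops hop reached := by
  intro n
  induction n with
  | zero =>
      intro hop visited frontier reached hn _ _ _ _
      have hlt : ¬ hop < max_hops + 1 := by omega
      rw [pvA_loop, pvB_loop]
      simp [hlt]
  | succ k ih =>
      intro hop visited frontier reached hn I1 I3 I2 I4
      by_cases hlt : hop < max_hops + 1
      · -- neighbour-set of reached = neighbour-set of visited (as predicates)
        have hRV : ∀ x, pvNB out_adj reached x ↔ pvNB out_adj visited x := fun x =>
          pvNB_congr (fun y => (I1 y).symm) x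
        -- hit condition coincides
        have hhit : pvNB out_adj frontier target ↔ target ∈ pvB_new out_adj reached := by
          rw [pvB_new_mem, hRV]
          constructor
          · exact pvNB_mono I3
          · intro h
            rcases I2 target h with h' | h'
            · exact absurd h' I4
            · exact h'
        rcases hN : pvA_nodes target out_adj frontier visited PySem.Set.empty with _ | ⟨v', nxt⟩
        · -- A returns hop; B hits target too
          have hT : pvNB out_adj frontier target :=
            ((pvA_nodes_spec target out_adj frontier visited PySem.Set.empty).1).1 hN
          rw [pvA_loop, pvB_loop]
          simp only [hlt, dif_pos, hN]
          rw [if_pos (hhit.1 hT)]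
        · have hnT : ¬ pvNB out_adj frontier target := by
            intro hT
            have hN' : pvA_nodes target out_adj frontier visited PySem.Set.empty = none :=
              ((pvA_nodes_spec target out_adj frontier visited PySem.Set.empty).1).2 hT
            rw [hN] at hN'
            simp at hN'
          obtain ⟨hv', hnxt⟩ :=
            (pvA_nodes_spec target out_adj frontier visited PySem.Set.empty).2 v' nxt hN
          have hnxt' : ∀ x, x ∈ nxt ↔ pvNB out_adj frontier x ∧ x ∉ visited := by
            intro x
            rw [hnxt x]
            simp [PySem.Set.empty]
          -- emptiness of nxt ↔ new ⊆ reached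
          have hempty : nxt.isEmpty = PySem.Set.issubset (pvB_new out_adj reached) reached := by
            by_cases hsub : ∀ x, pvNB out_adj visited x → x ∈ visited
            · have h1 : nxt = [] := by
                rw [List.eq_nil_iff_forall_not_mem]
                intro x hx
                rw [hnxt' x] at hx
                exact hx.2 (hsub x (pvNB_mono I3 hx.1))
              have h2 : PySem.Set.issubset (pvB_new out_adj reached) reached = true := by
                rw [PySem.Set.issubset_iff]
                intro x hx
                rw [pvB_new_mem, hRV] at hx
                rw [← I1]
                exact hsub x hx
              rw [h1, h2]; rfl
            · obtain ⟨x, hx⟩ := not_forall.1 hsub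
              obtain ⟨hx1, hx2⟩ := Classical.not_imp.1 hx
              have hxf : pvNB out_adj frontier x := by
                rcases I2 x hx1 with h | h
                · exact absurd h hx2
                · exact h
              have h1 : nxt.isEmpty = false := by
                rcases nxt with _ | ⟨y, ys⟩
                · exact absurd ((hnxt' x).2 ⟨hxf, hx2⟩) (List.not_mem_nil)
                · rfl
              have h2 : PySem.Set.issubset (pvB_new out_adj reached) reached = false := by
                by_contra h
                have h' : PySem.Set.issubset (pvB_new out_adj reached) reached = true := by
                  revert h; cases PySem.Set.issubset (pvB_new out_adj reached) reached <;> simp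
                rw [PySem.Set.issubset_iff] at h'
                have := h' x (by rw [pvB_new_mem, hRV]; exact hx1)
                rw [← I1] at this
                exact hx2 this
              rw [h1, h2]
          rw [pvA_loop, pvB_loop]
          simp only [hlt, dif_pos, hN]
          rw [if_neg (fun h => hnT (hhit.2 h)), ← hempty]
          rcases hE : nxt.isEmpty with _ | _
          · -- continue: re-establish the invariant
            rw [if_neg (by simp), if_neg (by simp)]
            apply ih (hop + 1) v' nxt (PySem.Set.union reached (pvB_new out_adj reached))
              (by omega)
            · intro x
              rw [hv' x, PySem.Set.mem_union, pvB_new_mem, hRV, ← I1]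
              constructor
              · rintro (h | h)
                · tauto
                · right; exact pvNB_mono I3 h
              · rintro (h | h)
                · tauto
                · rcases I2 x h with h' | h' <;> tauto
            · intro x hx
              rw [hnxt' x] at hx
              rw [hv' x]
              tauto
            · intro x hx
              obtain ⟨m, hm, hmx⟩ := hx
              rw [hv' m] at hm
              rcases hm with hm | hm
              · have : pvNB out_adj visited x := ⟨m, hm, hmx⟩
                rcases I2 x this with h | h
                · left; rw [hv' x]; tauto
                · left; rw [hv' x]; tauto
              · by_cases hmv : m ∈ visited
                · have : pvNB out_adj visited x := ⟨m, hmv, hmx⟩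
                  rcases I2 x this with h | h
                  · left; rw [hv' x]; tauto
                  · left; rw [hv' x]; tauto
                · right
                  exact ⟨m, (hnxt' m).2 ⟨hm, hmv⟩, hmx⟩
            · intro hx
              rw [hv' target] at hx
              tauto
          · rw [if_pos rfl, if_pos rfl]
      · rw [pvA_loop, pvB_loop]
        simp [hlt]

-- ===== VERDICT (by name: the statement is the Claim_ definition above) =====
theorem bfs_directed_hops_py_spec : Claim_equal_bfs_directed_hops_py := by
  intro start target out_adj max_hops _
  unfold Spec_bfs_directed_hops_py bfs_directed_hops_py bfs_directed_hops_py_alt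
  by_cases h : start = target
  · simp [h]
  · rw [if_neg h, if_neg h]
    apply pvLoop_eq target out_adj max_hops (max_hops + 1 - 1).toNat 1 _ _ _ rfl
    · intro x; exact Iff.rfl
    · intro x hx; exact hx
    · intro x hx; right; exact hx
    · intro hx
      have : target = start := by
        simpa [PySem.Set.ofList] using hx
      exact h this.symm
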